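-- pv_equiv track=rewrite | github.com/yunseo-kim/yunseo-kim.github.io | tools/prompt.py | validate_diff_translation_output
-- ===== SOURCE A (Python) =====
-- FAILURE_CODES = {
--     "DIFF_EMPTY": "DIFF_EMPTY",
--     "DIFF_CODE_FENCE": "DIFF_CODE_FENCE",
--     "DIFF_HEADER_INVALID": "DIFF_HEADER_INVALID",
--     "DIFF_HUNK_MISSING": "DIFF_HUNK_MISSING",
--     "DIFF_INVALID_PREFIX": "DIFF_INVALID_PREFIX",
--     "PATCH_DRY_RUN_FAILED": "PATCH_DRY_RUN_FAILED",
--     "PATCH_APPLY_FAILED": "PATCH_APPLY_FAILED",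
--     "PATCH_TIMEOUT": "PATCH_TIMEOUT",
--     "PATCH_UNEXPECTED_ERROR": "PATCH_UNEXPECTED_ERROR",
--     "DIFF_RETRY_EXHAUSTED": "DIFF_RETRY_EXHAUSTED",
--     "DIFF_RETRY_STUCK": "DIFF_RETRY_STUCK",
--     "FULL_OUTPUT_EMPTY": "FULL_OUTPUT_EMPTY",
--     "FULL_CODE_FENCE": "FULL_CODE_FENCE",
--     "FULL_YAML_INVALID": "FULL_YAML_INVALID",
--     "FULL_RETRY_EXHAUSTED": "FULL_RETRY_EXHAUSTED",
-- }
--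
-- def collect_offending_lines(lines, allowed_prefixes, limit=2):
--     offenders = []
--     for line in lines:
--         if not line:
--             continue
--         if line.startswith(allowed_prefixes):
--             continue
--         offenders.append(line)
--         if len(offenders) >= limit:
--             break
--     return offenders
--
-- def validate_diff_translation_output(text):
--     errors = []
--     offending_lines = []
--     if not isinstance(text, str) or not text.strip():
--         errors.append("Diff output is empty.")
--         return False, errors, FAILURE_CODES["DIFF_EMPTY"], offending_lines
--
--     lines = text.splitlines()
--
--     if any(line.startswith("```") for line in lines):
--         errors.append("Do not include markdown code fences in diff output.")
--         offending_lines.extend([line for line in lines if line.startswith("```")][:2])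
--
--     first_nonempty = None
--     second_nonempty = None
--     for line in lines:
--         if line.strip():
--             if first_nonempty is None:
--                 first_nonempty = line
--             elif second_nonempty is None:
--                 second_nonempty = line
--                 break
--
--     if first_nonempty is None or not first_nonempty.startswith("--- "):
--         errors.append(
--             "Diff must start with a source header line beginning with '--- '."
--         )
--     if second_nonempty is None or not second_nonempty.startswith("+++ "):
--         errors.append("Diff must include a target header line beginning with '+++ '.")
--
--     if not any(line.startswith("@@") for line in lines):
--         errors.append(
--             "Diff must include at least one hunk header line starting with '@@'."
--         )
--
--     allowed_prefixes = ("--- ", "+++ ", "@@", "+", "-", " ", "\\ No newline")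
--     offending_lines.extend(collect_offending_lines(lines, allowed_prefixes))
--     if offending_lines:
--         errors.append(
--             "Diff contains an invalid line prefix. Only unified diff patch lines are allowed."
--         )
--
--     if errors:
--         if any("code fences" in error for error in errors):
--             return False, errors, FAILURE_CODES["DIFF_CODE_FENCE"], offending_lines
--         if any("source header" in error for error in errors) or any(
--             "target header" in error for error in errors
--         ):
--             return False, errors, FAILURE_CODES["DIFF_HEADER_INVALID"], offending_lines
--         if any("hunk header" in error for error in errors):
--             return False, errors, FAILURE_CODES["DIFF_HUNK_MISSING"], offending_lines
--         if any("invalid line prefix" in error for error in errors):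
--             return False, errors, FAILURE_CODES["DIFF_INVALID_PREFIX"], offending_lines
--
--     return True, errors, None, offending_lines
-- ===== SOURCE B (Python) =====
-- FAILURE_CODES = {
--     "DIFF_EMPTY": "DIFF_EMPTY",
--     "DIFF_CODE_FENCE": "DIFF_CODE_FENCE",
--     "DIFF_HEADER_INVALID": "DIFF_HEADER_INVALID",
--     "DIFF_HUNK_MISSING": "DIFF_HUNK_MISSING",
--     "DIFF_INVALID_PREFIX": "DIFF_INVALID_PREFIX",
--     "PATCH_DRY_RUN_FAILED": "PATCH_DRY_RUN_FAILED",
--     "PATCH_APPLY_FAILED": "PATCH_APPLY_FAILED",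
--     "PATCH_TIMEOUT": "PATCH_TIMEOUT",
--     "PATCH_UNEXPECTED_ERROR": "PATCH_UNEXPECTED_ERROR",
--     "DIFF_RETRY_EXHAUSTED": "DIFF_RETRY_EXHAUSTED",
--     "DIFF_RETRY_STUCK": "DIFF_RETRY_STUCK",
--     "FULL_OUTPUT_EMPTY": "FULL_OUTPUT_EMPTY",
--     "FULL_CODE_FENCE": "FULL_CODE_FENCE",
--     "FULL_YAML_INVALID": "FULL_YAML_INVALID",
--     "FULL_RETRY_EXHAUSTED": "FULL_RETRY_EXHAUSTED",
-- }
--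
--
-- def validate_diff_translation_output(text):
--     if not isinstance(text, str) or not text.strip():
--         return False, ["Diff output is empty."], FAILURE_CODES["DIFF_EMPTY"], []
--
--     allowed_prefixes = ("--- ", "+++ ", "@@", "+", "-", " ", "\\ No newline")
--     fences = []
--     offenders = []
--     first_nonempty = None
--     second_nonempty = None
--     has_hunk = False
--     for line in text.splitlines():
--         if line.startswith("```") and len(fences) < 2:
--             fences.append(line)
--         if line.strip():
--             if first_nonempty is None:
--                 first_nonempty = line
--             elif second_nonempty is None:
--                 second_nonempty = line
--         if line.startswith("@@"):
--             has_hunk = True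
--         if line and not line.startswith(allowed_prefixes) and len(offenders) < 2:
--             offenders.append(line)
--
--     errors = []
--     if fences:
--         errors.append("Do not include markdown code fences in diff output.")
--     if first_nonempty is None or not first_nonempty.startswith("--- "):
--         errors.append(
--             "Diff must start with a source header line beginning with '--- '."
--         )
--     if second_nonempty is None or not second_nonempty.startswith("+++ "):
--         errors.append("Diff must include a target header line beginning with '+++ '.")
--     if not has_hunk:
--         errors.append(
--             "Diff must include at least one hunk header line starting with '@@'."
--         )
--     offending_lines = fences + offenders
--     if offending_lines:
--         errors.append(
--             "Diff contains an invalid line prefix. Only unified diff patch lines are allowed."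
--         )
--
--     if not errors:
--         return True, errors, None, offending_lines
--     if fences:
--         code = FAILURE_CODES["DIFF_CODE_FENCE"]
--     elif (
--         first_nonempty is None
--         or not first_nonempty.startswith("--- ")
--         or second_nonempty is None
--         or not second_nonempty.startswith("+++ ")
--     ):
--         code = FAILURE_CODES["DIFF_HEADER_INVALID"]
--     elif not has_hunk:
--         code = FAILURE_CODES["DIFF_HUNK_MISSING"]
--     else:
--         code = FAILURE_CODES["DIFF_INVALID_PREFIX"]
--     return False, errors, code, offending_lines
-- ===== Notes on version B (the rewrite author's own statement) =====
-- stated objective: simpler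
-- what changed: Replaces A's five separate scans over the lines (an any() for fences, a filter+slice, a break-loop for the first two non-empty lines, an any() for hunks, a helper loop for offenders) and its substring-matching error dispatch with one pass that maintains all five facts at once and a direct if/elif code selection.
import Mathlib
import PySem

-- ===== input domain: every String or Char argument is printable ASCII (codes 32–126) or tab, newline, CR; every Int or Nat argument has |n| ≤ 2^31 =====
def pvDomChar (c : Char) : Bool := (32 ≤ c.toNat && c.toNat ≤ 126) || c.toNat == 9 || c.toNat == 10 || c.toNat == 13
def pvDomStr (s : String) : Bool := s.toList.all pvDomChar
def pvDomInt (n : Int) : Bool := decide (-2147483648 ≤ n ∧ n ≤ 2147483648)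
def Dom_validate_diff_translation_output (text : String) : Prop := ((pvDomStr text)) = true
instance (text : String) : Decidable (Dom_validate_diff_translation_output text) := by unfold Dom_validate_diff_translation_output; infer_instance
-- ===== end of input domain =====

-- B folds A's five separate scans over the lines into one pass maintaining all facts at once,
-- with a direct if/elif failure-code selection instead of A's substring-matching dispatch (objective: simpler).


-- shared literal messages and the allowed-prefix tuple test (identical in both Pythons)
def pvMsgF : String := "Do not include markdown code fences in diff output."
def pvMsgS : String := "Diff must start with a source header line beginning with '--- '."
def pvMsgT : String := "Diff must include a target header line beginning with '+++ '."
def pvMsgH : String := "Diff must include at least one hunk header line starting with '@@'."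
def pvMsgP : String := "Diff contains an invalid line prefix. Only unified diff patch lines are allowed."

def pvIsFence (l : String) : Bool := PySem.Str.startswith l "```"

def pvAllowed (l : String) : Bool :=
  PySem.Str.startswith l "--- " || PySem.Str.startswith l "+++ " || PySem.Str.startswith l "@@" ||
  PySem.Str.startswith l "+" || PySem.Str.startswith l "-" || PySem.Str.startswith l " " ||
  PySem.Str.startswith l "\\ No newline"

-- first_nonempty is None or not first_nonempty.startswith('--- ')
def pvBadSrc (f : Option String) : Bool :=
  match f with
  | none => true
  | some l => !PySem.Str.startswith l "--- "

def pvIsHunk (l : String) : Bool := PySem.Str.startswith l "@@"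

def pvBadTgt (s : Option String) : Bool :=
  match s with
  | none => true
  | some l => !PySem.Str.startswith l "+++ "

-- ===== PORT A =====
-- A's helper collect_offending_lines (limit = 2): loop with break
def pvCollectA : List String → List String → Nat → List String
  | [], offenders, _ => offenders
  | l :: rest, offenders, limit =>
    if l = "" then pvCollectA rest offenders limit
    else if pvAllowed l then pvCollectA rest offenders limit
    else
      let offenders' := offenders ++ [l]
      if limit ≤ offenders'.length then offenders' else pvCollectA rest offenders' limit

def collect_offending_lines (lines : List String) (limit : Nat) : List String :=
  pvCollectA lines [] limit

-- A's first/second non-empty loop with break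
def pvFirstTwoA : List String → Option String → Option String → Option String × Option String
  | [], f, s => (f, s)
  | l :: rest, f, s =>
    if PySem.Str.strip l = "" then pvFirstTwoA rest f s
    else
      match f with
      | none => pvFirstTwoA rest (some l) s
      | some _ =>
        match s with
        | none => (f, some l)          -- break
        | some _ => pvFirstTwoA rest f s

def validate_diff_translation_output (text : String) : Bool × List String × Option String × List String :=
  if PySem.Str.strip text = "" then (false, ["Diff output is empty."], some "DIFF_EMPTY", [])
  else
    let lines := PySem.Str.splitlines text
    let feAny := lines.any pvIsFence
    let errors1 := if feAny then [pvMsgF] else []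
    let off1 : List String := if feAny then [] ++ (lines.filter pvIsFence).take 2 else []
    let fs := pvFirstTwoA lines none none
    let errors2 := if pvBadSrc fs.1 then errors1 ++ [pvMsgS] else errors1
    let errors3 := if pvBadTgt fs.2 then errors2 ++ [pvMsgT] else errors2
    let errors4 := if !(lines.any pvIsHunk) then errors3 ++ [pvMsgH] else errors3
    let off2 := off1 ++ collect_offending_lines lines 2
    let errors5 := if off2 ≠ [] then errors4 ++ [pvMsgP] else errors4
    if errors5 ≠ [] then
      if errors5.any (fun e => PySem.Str.isIn "code fences" e) then (false, errors5, some "DIFF_CODE_FENCE", off2)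
      else if errors5.any (fun e => PySem.Str.isIn "source header" e) || errors5.any (fun e => PySem.Str.isIn "target header" e) then
        (false, errors5, some "DIFF_HEADER_INVALID", off2)
      else if errors5.any (fun e => PySem.Str.isIn "hunk header" e) then (false, errors5, some "DIFF_HUNK_MISSING", off2)
      else if errors5.any (fun e => PySem.Str.isIn "invalid line prefix" e) then (false, errors5, some "DIFF_INVALID_PREFIX", off2)
      else (true, errors5, none, off2)
    else (true, errors5, none, off2)

-- ===== PORT B =====
structure PvSt where
  fences : List String
  fne : Option String
  sne : Option String
  hunk : Bool
  offs : List String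

def pvIsOffender (l : String) : Bool := !(l == "") && !pvAllowed l

-- B's single loop body, updating the five facts in sequence
def pvLoopB : List String → PvSt → PvSt
  | [], st => st
  | l :: rest, st =>
    let fences' := if pvIsFence l && decide (st.fences.length < 2) then st.fences ++ [l] else st.fences
    let fs' : Option String × Option String :=
      if PySem.Str.strip l = "" then (st.fne, st.sne)
      else
        match st.fne with
        | none => (some l, st.sne)
        | some f =>
          match st.sne with
          | none => (some f, some l)
          | some s => (some f, some s)
    let hunk' := if pvIsHunk l then true else st.hunk
    let offs' := if pvIsOffender l && decide (st.offs.length < 2) then st.offs ++ [l] else st.offs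
    pvLoopB rest ⟨fences', fs'.1, fs'.2, hunk', offs'⟩

def validate_diff_translation_output_alt (text : String) : Bool × List String × Option String × List String :=
  if PySem.Str.strip text = "" then (false, ["Diff output is empty."], some "DIFF_EMPTY", [])
  else
    let st := pvLoopB (PySem.Str.splitlines text) ⟨[], none, none, false, []⟩
    let e1 := if st.fences ≠ [] then [pvMsgF] else []
    let e2 := e1 ++ (if pvBadSrc st.fne then [pvMsgS] else [])
    let e3 := e2 ++ (if pvBadTgt st.sne then [pvMsgT] else [])
    let e4 := e3 ++ (if !st.hunk then [pvMsgH] else [])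
    let offending := st.fences ++ st.offs
    let e5 := e4 ++ (if offending ≠ [] then [pvMsgP] else [])
    if e5 = [] then (true, e5, none, offending)
    else
      let code :=
        if st.fences ≠ [] then "DIFF_CODE_FENCE"
        else if pvBadSrc st.fne || pvBadTgt st.sne then "DIFF_HEADER_INVALID"
        else if !st.hunk then "DIFF_HUNK_MISSING"
        else "DIFF_INVALID_PREFIX"
      (false, e5, some code, offending)

-- ===== PRECONDITION & SPEC =====
def Spec_validate_diff_translation_output (text : String) (out : Bool × List String × Option String × List String) : Prop := out = validate_diff_translation_output_alt text
instance (text : String) (out : Bool × List String × Option String × List String) : Decidable (Spec_validate_diff_translation_output text out) := by unfold Spec_validate_diff_translation_output; infer_instance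

-- ===== CLAIM (what is proved, stated in full; the proofs are below) =====
def Claim_equal_validate_diff_translation_output : Prop := ∀ (text : String), Dom_validate_diff_translation_output text → Spec_validate_diff_translation_output text (validate_diff_translation_output text)

-- ===== LEMMAS AND PROOFS =====

theorem pvLoopB_fences (lines : List String) : ∀ st : PvSt,
    (pvLoopB lines st).fences = st.fences ++ (lines.filter pvIsFence).take (2 - st.fences.length) := by
  induction lines with
  | nil => intro st; simp [pvLoopB]
  | cons l rest ih =>
    intro st
    simp only [pvLoopB]
    rw [ih]
    by_cases hl : pvIsFence l = true
    · by_cases hn : st.fences.length < 2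
      · have h2 : 2 - st.fences.length = (2 - (st.fences.length + 1)) + 1 := by omega
        simp only [hl, hn, decide_true, Bool.and_self, ite_true, List.filter_cons_of_pos,
          List.length_append, List.length_cons, List.length_nil, Nat.zero_add, h2,
          List.take_succ_cons, List.append_assoc, List.cons_append, List.nil_append]
      · have hnot : ¬ ((pvIsFence l && decide (st.fences.length < 2)) = true) := by simp [hn]
        have h2 : 2 - st.fences.length = 0 := by omega
        simp only [if_neg hnot, List.filter_cons_of_pos hl, h2, List.take_zero, List.append_nil]
    · have hnot : ¬ ((pvIsFence l && decide (st.fences.length < 2)) = true) := by simp [hl]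
      simp only [if_neg hnot, List.filter_cons_of_neg (by simpa using hl)]

theorem pvLoopB_offs (lines : List String) : ∀ st : PvSt,
    (pvLoopB lines st).offs = st.offs ++ (lines.filter pvIsOffender).take (2 - st.offs.length) := by
  induction lines with
  | nil => intro st; simp [pvLoopB]
  | cons l rest ih =>
    intro st
    simp only [pvLoopB]
    rw [ih]
    by_cases hl : pvIsOffender l = true
    · by_cases hn : st.offs.length < 2
      · have h2 : 2 - st.offs.length = (2 - (st.offs.length + 1)) + 1 := by omega
        simp only [hl, hn, decide_true, Bool.and_self, ite_true, List.filter_cons_of_pos,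
          List.length_append, List.length_cons, List.length_nil, Nat.zero_add, h2,
          List.take_succ_cons, List.append_assoc, List.cons_append, List.nil_append]
      · have hnot : ¬ ((pvIsOffender l && decide (st.offs.length < 2)) = true) := by simp [hn]
        have h2 : 2 - st.offs.length = 0 := by omega
        simp only [if_neg hnot, List.filter_cons_of_pos hl, h2, List.take_zero, List.append_nil]
    · have hnot : ¬ ((pvIsOffender l && decide (st.offs.length < 2)) = true) := by simp [hl]
      simp only [if_neg hnot, List.filter_cons_of_neg (by simpa using hl)]

theorem pvLoopB_hunk (lines : List String) : ∀ st : PvSt,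
    (pvLoopB lines st).hunk = (st.hunk || lines.any pvIsHunk) := by
  induction lines with
  | nil => intro st; simp [pvLoopB]
  | cons l rest ih =>
    intro st
    simp only [pvLoopB]
    rw [ih]
    simp only [List.any_cons]
    cases pvIsHunk l
    · simp
    · simp

theorem pvFirstTwoA_full (lines : List String) (a b : String) :
    pvFirstTwoA lines (some a) (some b) = (some a, some b) := by
  induction lines with
  | nil => rfl
  | cons l rest ih => simp only [pvFirstTwoA]; split <;> simp [ih]

theorem pvLoopB_fs (lines : List String) : ∀ st : PvSt,
    ((pvLoopB lines st).fne, (pvLoopB lines st).sne) = pvFirstTwoA lines st.fne st.sne := by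
  induction lines with
  | nil => intro st; simp [pvLoopB, pvFirstTwoA]
  | cons l rest ih =>
    intro st
    simp only [pvLoopB, pvFirstTwoA]
    by_cases hl : PySem.Str.strip l = ""
    · rw [if_pos hl, if_pos hl]
      exact ih _
    · rw [if_neg hl, if_neg hl]
      cases hf : st.fne with
      | none => exact ih _
      | some f =>
        cases hsn : st.sne with
        | none =>
          rw [ih]
          exact pvFirstTwoA_full rest f l
        | some s => exact ih _

theorem pvCollectA_char (lines : List String) : ∀ acc : List String, acc.length < 2 →
    pvCollectA lines acc 2 = acc ++ (lines.filter pvIsOffender).take (2 - acc.length) := by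
  induction lines with
  | nil => intro acc _; simp [pvCollectA]
  | cons l rest ih =>
    intro acc hacc
    simp only [pvCollectA]
    by_cases he : l = ""
    · rw [if_pos he, ih acc hacc, List.filter_cons_of_neg (by simp [pvIsOffender, he])]
    · by_cases ha : pvAllowed l = true
      · rw [if_neg he, if_pos ha, ih acc hacc, List.filter_cons_of_neg (by simp [pvIsOffender, ha])]
      · have hpa : pvAllowed l = false := by simpa using ha
        have hoff : pvIsOffender l = true := by simp [pvIsOffender, he, hpa]
        rw [if_neg he, if_neg ha, List.filter_cons_of_pos hoff]
        by_cases h1 : acc.length = 1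
        · have hle : 2 ≤ (acc ++ [l]).length := by
            simp only [List.length_append, List.length_cons, List.length_nil, h1]
            omega
          rw [if_pos hle]
          have h2 : 2 - acc.length = 0 + 1 := by omega
          rw [h2, List.take_succ_cons, List.take_zero]
        · have h0 : acc.length = 0 := by omega
          have hlt : ¬ 2 ≤ (acc ++ [l]).length := by
            simp only [List.length_append, List.length_cons, List.length_nil]
            omega
          rw [if_neg hlt]
          have hacc' : (acc ++ [l]).length < 2 := by
            simp only [List.length_append, List.length_cons, List.length_nil]
            omega
          rw [ih _ hacc']
          have h2 : 2 - acc.length = (2 - (acc ++ [l]).length) + 1 := by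
            simp only [List.length_append, List.length_cons, List.length_nil]
            omega
          rw [h2, List.take_succ_cons, List.append_assoc, List.cons_append, List.nil_append]

-- kernel-checked values of the substring tests A's error dispatch performs on its five literal messages
theorem pvIsIn_cf_F : PySem.Str.isIn "code fences" pvMsgF = true := by decide
theorem pvIsIn_cf_S : PySem.Str.isIn "code fences" pvMsgS = false := by decide
theorem pvIsIn_cf_T : PySem.Str.isIn "code fences" pvMsgT = false := by decide
theorem pvIsIn_cf_H : PySem.Str.isIn "code fences" pvMsgH = false := by decide
theorem pvIsIn_cf_P : PySem.Str.isIn "code fences" pvMsgP = false := by decide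
theorem pvIsIn_sh_F : PySem.Str.isIn "source header" pvMsgF = false := by decide
theorem pvIsIn_sh_S : PySem.Str.isIn "source header" pvMsgS = true := by decide
theorem pvIsIn_sh_T : PySem.Str.isIn "source header" pvMsgT = false := by decide
theorem pvIsIn_sh_H : PySem.Str.isIn "source header" pvMsgH = false := by decide
theorem pvIsIn_sh_P : PySem.Str.isIn "source header" pvMsgP = false := by decide
theorem pvIsIn_th_F : PySem.Str.isIn "target header" pvMsgF = false := by decide
theorem pvIsIn_th_S : PySem.Str.isIn "target header" pvMsgS = false := by decide
theorem pvIsIn_th_T : PySem.Str.isIn "target header" pvMsgT = true := by decide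
theorem pvIsIn_th_H : PySem.Str.isIn "target header" pvMsgH = false := by decide
theorem pvIsIn_th_P : PySem.Str.isIn "target header" pvMsgP = false := by decide
theorem pvIsIn_hh_F : PySem.Str.isIn "hunk header" pvMsgF = false := by decide
theorem pvIsIn_hh_S : PySem.Str.isIn "hunk header" pvMsgS = false := by decide
theorem pvIsIn_hh_T : PySem.Str.isIn "hunk header" pvMsgT = false := by decide
theorem pvIsIn_hh_H : PySem.Str.isIn "hunk header" pvMsgH = true := by decide
theorem pvIsIn_hh_P : PySem.Str.isIn "hunk header" pvMsgP = false := by decide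
theorem pvIsIn_ip_F : PySem.Str.isIn "invalid line prefix" pvMsgF = false := by decide
theorem pvIsIn_ip_S : PySem.Str.isIn "invalid line prefix" pvMsgS = false := by decide
theorem pvIsIn_ip_T : PySem.Str.isIn "invalid line prefix" pvMsgT = false := by decide
theorem pvIsIn_ip_H : PySem.Str.isIn "invalid line prefix" pvMsgH = false := by decide
theorem pvIsIn_ip_P : PySem.Str.isIn "invalid line prefix" pvMsgP = true := by decide

-- ===== VERDICT (by name: the statement is the Claim_ definition above) =====
set_option maxHeartbeats 1000000 in
theorem validate_diff_translation_output_spec : Claim_equal_validate_diff_translation_output := by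
  intro text _
  unfold Spec_validate_diff_translation_output
  unfold validate_diff_translation_output validate_diff_translation_output_alt
  by_cases hs : PySem.Str.strip text = ""
  · rw [if_pos hs, if_pos hs]
  · rw [if_neg hs, if_neg hs]
    have hF := pvLoopB_fences (PySem.Str.splitlines text) ⟨[], none, none, false, []⟩
    have hO := pvLoopB_offs (PySem.Str.splitlines text) ⟨[], none, none, false, []⟩
    have hH := pvLoopB_hunk (PySem.Str.splitlines text) ⟨[], none, none, false, []⟩
    have hFS := pvLoopB_fs (PySem.Str.splitlines text) ⟨[], none, none, false, []⟩
    have hC := pvCollectA_char (PySem.Str.splitlines text) [] (by simp)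
    have hf1 : (pvLoopB (PySem.Str.splitlines text) ⟨[], none, none, false, []⟩).fne
        = (pvFirstTwoA (PySem.Str.splitlines text) none none).1 := by rw [← hFS]
    have hf2 : (pvLoopB (PySem.Str.splitlines text) ⟨[], none, none, false, []⟩).sne
        = (pvFirstTwoA (PySem.Str.splitlines text) none none).2 := by rw [← hFS]
    simp only [List.length_nil, Nat.sub_zero, List.nil_append] at hF hO hC
    simp only [Bool.false_or] at hH
    simp only [collect_offending_lines, hF, hO, hH, hf1, hf2, hC]
    by_cases hfe : List.filter pvIsFence (PySem.Str.splitlines text) = []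
    · have ha : (PySem.Str.splitlines text).any pvIsFence = false := by
        rw [List.any_eq_false]
        intro x hx
        simpa using List.filter_eq_nil_iff.mp hfe x hx
      simp only [hfe, List.take_nil, ha]
      generalize List.take 2 (List.filter pvIsOffender (PySem.Str.splitlines text)) = OFF
      generalize pvBadSrc (pvFirstTwoA (PySem.Str.splitlines text) none none).1 = b2
      generalize pvBadTgt (pvFirstTwoA (PySem.Str.splitlines text) none none).2 = b3
      generalize List.any (PySem.Str.splitlines text) pvIsHunk = b4
      cases b2 <;> cases b3 <;> cases b4 <;> by_cases hOFF : OFF = [] <;>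
        simp only [hOFF, List.nil_append, List.append_nil, List.cons_append, List.singleton_append, List.any_append, List.any_cons, List.any_nil, pvIsIn_cf_F, pvIsIn_cf_S, pvIsIn_cf_T, pvIsIn_cf_H, pvIsIn_cf_P, pvIsIn_sh_F, pvIsIn_sh_S, pvIsIn_sh_T, pvIsIn_sh_H, pvIsIn_sh_P, pvIsIn_th_F, pvIsIn_th_S, pvIsIn_th_T, pvIsIn_th_H, pvIsIn_th_P, pvIsIn_hh_F, pvIsIn_hh_S, pvIsIn_hh_T, pvIsIn_hh_H, pvIsIn_hh_P, pvIsIn_ip_F, pvIsIn_ip_S, pvIsIn_ip_T, pvIsIn_ip_H, pvIsIn_ip_P, Bool.or_true, Bool.or_false, Bool.true_or, Bool.false_or, Bool.not_true, Bool.not_false, Bool.false_eq_true, eq_self_iff_true, ne_eq, not_true_eq_false, not_false_eq_true, reduceCtorEq, List.cons_ne_nil, if_true, if_false, ite_true, ite_false, reduceIte]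
    · have ha : (PySem.Str.splitlines text).any pvIsFence = true := by
        rw [List.any_eq_true]
        obtain ⟨x, hx⟩ := List.exists_mem_of_ne_nil _ hfe
        exact ⟨x, List.mem_of_mem_filter hx, List.of_mem_filter hx⟩
      simp only [ha]
      generalize hGF : List.take 2 (List.filter pvIsFence (PySem.Str.splitlines text)) = F
      generalize List.take 2 (List.filter pvIsOffender (PySem.Str.splitlines text)) = OFF
      generalize pvBadSrc (pvFirstTwoA (PySem.Str.splitlines text) none none).1 = b2
      generalize pvBadTgt (pvFirstTwoA (PySem.Str.splitlines text) none none).2 = b3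
      generalize List.any (PySem.Str.splitlines text) pvIsHunk = b4
      have hFne : ¬ (F = []) := by
        rw [← hGF]
        simp [List.take_eq_nil_iff, hfe]
      have hOff2 : ¬ (F ++ OFF = []) := by simp [hFne]
      cases b2 <;> cases b3 <;> cases b4 <;>
        simp only [eq_true hFne, eq_true hOff2, List.nil_append, List.append_nil, List.cons_append, List.singleton_append, List.any_append, List.any_cons, List.any_nil, pvIsIn_cf_F, pvIsIn_cf_S, pvIsIn_cf_T, pvIsIn_cf_H, pvIsIn_cf_P, pvIsIn_sh_F, pvIsIn_sh_S, pvIsIn_sh_T, pvIsIn_sh_H, pvIsIn_sh_P, pvIsIn_th_F, pvIsIn_th_S, pvIsIn_th_T, pvIsIn_th_H, pvIsIn_th_P, pvIsIn_hh_F, pvIsIn_hh_S, pvIsIn_hh_T, pvIsIn_hh_H, pvIsIn_hh_P, pvIsIn_ip_F, pvIsIn_ip_S, pvIsIn_ip_T, pvIsIn_ip_H, pvIsIn_ip_P, Bool.or_true, Bool.or_false, Bool.true_or, Bool.false_or, Bool.not_true, Bool.not_false, Bool.false_eq_true, eq_self_iff_true, ne_eq, not_true_eq_false, not_false_eq_true,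 reduceCtorEq, List.cons_ne_nil, if_true, if_false, ite_true, ite_false, reduceIte]
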